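-- pv_equiv track=rewrite | github.com/nomokazu/linking-attack-poc | attack/drawGraph.py | removeBeforeData
-- ===== SOURCE A (Python) =====
-- def removeBeforeData(timeList, signalStrengthList, targetTime):
--     resultTimeList = []
--     resultSignalStrengthList = []
--     for i,aTime in enumerate(timeList):
--         if aTime > targetTime:
--             resultTimeList.append(aTime)
--             resultSignalStrengthList.append(signalStrengthList[i])
--     return resultTimeList, resultSignalStrengthList
-- ===== SOURCE B (Python) =====
-- def removeBeforeData(timeList, signalStrengthList, targetTime):
--     def go(lo, hi):
--         if hi <= lo:
--             return [], []
--         if hi == lo + 1: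
--             t = timeList[lo]
--             if t > targetTime:
--                 return [t], [signalStrengthList[lo]]
--             return [], []
--         mid = (lo + hi) // 2
--         lt, ls = go(lo, mid)
--         rt, rs = go(mid, hi)
--         return lt + rt, ls + rs
--     return go(0, len(timeList))
-- ===== Notes on version B (the rewrite author's own statement) =====
-- stated objective: alternative
-- what changed: Replaced A's single left-to-right indexed filtering loop with two growing accumulators by a divide-and-conquer recursion that splits the index range in half, filters each half recursively, and concatenates the results (filtering distributes over concatenation).
import Mathlib
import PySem

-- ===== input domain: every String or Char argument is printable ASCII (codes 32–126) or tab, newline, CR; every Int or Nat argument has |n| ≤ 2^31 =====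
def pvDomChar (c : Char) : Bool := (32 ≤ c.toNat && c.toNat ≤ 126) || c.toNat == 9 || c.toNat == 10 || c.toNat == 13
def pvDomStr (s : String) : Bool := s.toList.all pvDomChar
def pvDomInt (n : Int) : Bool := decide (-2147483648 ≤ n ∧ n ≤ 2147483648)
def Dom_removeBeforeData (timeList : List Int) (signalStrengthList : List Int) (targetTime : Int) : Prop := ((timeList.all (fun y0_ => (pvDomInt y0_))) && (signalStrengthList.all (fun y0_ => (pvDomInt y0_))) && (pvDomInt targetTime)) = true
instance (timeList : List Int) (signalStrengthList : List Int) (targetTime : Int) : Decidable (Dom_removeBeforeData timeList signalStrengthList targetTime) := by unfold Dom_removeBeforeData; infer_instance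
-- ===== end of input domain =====

-- B replaces A's single left-to-right indexed filtering loop by a divide-and-conquer
-- recursion over the index range (split at the midpoint, recurse, concatenate): an
-- alternative decomposition of the same filter, not faster.

-- ===== PORT A =====
-- the 'for i,aTime in enumerate(timeList)' loop: i is the counter, acc the two result lists;
-- signalStrengthList[i] is pyGet? (none = IndexError, excluded by Pre_; .getD 0 is never used inside Pre_)
def goA (sl : List Int) (tt : Int) : Nat → List Int → List Int × List Int → List Int × List Int
  | _, [], acc => acc
  | i, t :: rest, acc =>
      if t > tt then
        goA sl tt (i + 1) rest (acc.1 ++ [t], acc.2 ++ [(PySem.List.pyGet? sl (i : Int)).getD 0])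
      else goA sl tt (i + 1) rest acc

def removeBeforeData (timeList : List Int) (signalStrengthList : List Int) (targetTime : Int) : List Int × List Int :=
  goA signalStrengthList targetTime 0 timeList ([], [])

-- ===== PORT B =====
-- Source B's inner 'go(lo, hi)': halve the index range, recurse, concatenate the two halves;
-- timeList[lo]/signalStrengthList[lo] are pyGet? (none = IndexError, excluded by Pre_).
-- The fuel argument (= hi - lo at the top call) is only a structural termination device.
def goB (tl sl : List Int) (tt : Int) : Nat → Nat → Nat → List Int × List Int
  | 0, _, _ => ([], [])
  | fuel + 1, lo, hi =>
      if hi ≤ lo then ([], [])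
      else if hi = lo + 1 then
        let t := (PySem.List.pyGet? tl (lo : Int)).getD 0
        if t > tt then ([t], [(PySem.List.pyGet? sl (lo : Int)).getD 0]) else ([], [])
      else
        let mid := (lo + hi) / 2
        let l := goB tl sl tt fuel lo mid
        let r := goB tl sl tt fuel mid hi
        (l.1 ++ r.1, l.2 ++ r.2)

def removeBeforeData_alt (timeList : List Int) (signalStrengthList : List Int) (targetTime : Int) : List Int × List Int :=
  goB timeList signalStrengthList targetTime timeList.length 0 timeList.length

-- ===== PRECONDITION & SPEC =====
-- Pre_ excludes exactly the inputs on which A raises IndexError (a timeList entry past the end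
-- of signalStrengthList that exceeds targetTime); B raises there too.
def Pre_removeBeforeData (timeList : List Int) (signalStrengthList : List Int) (targetTime : Int) : Prop :=
  ∀ j ∈ List.range timeList.length, timeList[j]! > targetTime → j < signalStrengthList.length
instance (timeList : List Int) (signalStrengthList : List Int) (targetTime : Int) : Decidable (Pre_removeBeforeData timeList signalStrengthList targetTime) := by unfold Pre_removeBeforeData; infer_instance

def pvWitness_removeBeforeData : List Int × List Int × Int := ([1, 5, 2], [10, 20, 30], 1)

def Spec_removeBeforeData (timeList : List Int) (signalStrengthList : List Int) (targetTime : Int) (out : List Int × List Int) : Prop := out = removeBeforeData_alt timeList signalStrengthList targetTime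
instance (timeList : List Int) (signalStrengthList : List Int) (targetTime : Int) (out : List Int × List Int) : Decidable (Spec_removeBeforeData timeList signalStrengthList targetTime out) := by unfold Spec_removeBeforeData; infer_instance

-- ===== CLAIM (what is proved, stated in full; the proofs are below) =====
def Claim_equal_removeBeforeData : Prop := ∀ (timeList : List Int) (signalStrengthList : List Int) (targetTime : Int), Dom_removeBeforeData timeList signalStrengthList targetTime → Pre_removeBeforeData timeList signalStrengthList targetTime → Spec_removeBeforeData timeList signalStrengthList targetTime (removeBeforeData timeList signalStrengthList targetTime)

-- ===== LEMMAS AND PROOFS =====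

-- A's loop computes the kept pairs of the zip, in order.
lemma goA_eq (sl : List Int) (tt : Int) (tl : List Int) :
    ∀ (k : Nat) (a b : List Int),
      (∀ j, (h : j < tl.length) → tl[j] > tt → k + j < sl.length) →
      goA sl tt k tl (a, b) =
        (a ++ ((tl.zip (sl.drop k)).filter (fun p => decide (p.1 > tt))).map Prod.fst,
         b ++ ((tl.zip (sl.drop k)).filter (fun p => decide (p.1 > tt))).map Prod.snd) := by
  induction tl with
  | nil => intro k a b _; simp [goA]
  | cons t rest ih =>
    intro k a b hpre
    have hrest : ∀ j, (h : j < rest.length) → rest[j] > tt → (k + 1) + j < sl.length := by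
      intro j hj hgt
      have := hpre (j + 1) (by simpa using Nat.succ_lt_succ hj) (by simpa using hgt)
      omega
    by_cases ht : t > tt
    · have hk : k < sl.length := by
        have := hpre 0 (by simp) (by simpa using ht)
        omega
      have hdrop : sl.drop k = sl[k] :: sl.drop (k + 1) := List.drop_eq_getElem_cons hk
      have hget : (PySem.List.pyGet? sl (k : Int)).getD 0 = sl[k] := by
        simp [PySem.List.pyGet?_natCast, List.getElem?_eq_getElem hk]
      rw [show goA sl tt k (t :: rest) (a, b)
            = goA sl tt (k + 1) rest (a ++ [t], b ++ [(PySem.List.pyGet? sl (k : Int)).getD 0]) by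
            simp [goA, ht]]
      rw [hget, ih (k + 1) (a ++ [t]) (b ++ [sl[k]]) hrest, hdrop]
      simp only [List.zip_cons_cons, List.filter_cons, decide_eq_true_eq,
        List.append_assoc, List.singleton_append]
      rw [if_pos ht]
      simp
    · rw [show goA sl tt k (t :: rest) (a, b) = goA sl tt (k + 1) rest (a, b) by
            simp [goA, ht]]
      rw [ih (k + 1) a b hrest]
      rw [← List.tail_drop]
      rcases hdk : sl.drop k with _ | ⟨s, r⟩
      · simp
      · simp [ht]

-- B's recursion on [lo, hi) computes the kept pairs of the corresponding slice of the zip.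
lemma goB_eq (tl sl : List Int) (tt : Int) :
    ∀ (fuel lo hi : Nat), hi - lo ≤ fuel → hi ≤ tl.length →
      (∀ j, (h : j < tl.length) → lo ≤ j → j < hi → tl[j] > tt → j < sl.length) →
      goB tl sl tt fuel lo hi =
        (((((tl.zip sl).drop lo).take (hi - lo)).filter (fun p => decide (p.1 > tt))).map Prod.fst,
         ((((tl.zip sl).drop lo).take (hi - lo)).filter (fun p => decide (p.1 > tt))).map Prod.snd) := by
  intro fuel
  induction fuel with
  | zero =>
    intro lo hi hn _ _
    have h0 : hi - lo = 0 := Nat.le_zero.mp hn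
    simp [goB, h0]
  | succ m ih =>
    intro lo hi hn hlen hpre
    by_cases hle : hi ≤ lo
    · simp [goB, hle, Nat.sub_eq_zero_of_le hle]
    · by_cases hone : hi = lo + 1
      · subst hone
        have hlo : lo < tl.length := by omega
        have hsub : lo + 1 - lo = 1 := by omega
        have hgetT : (PySem.List.pyGet? tl (lo : Int)).getD 0 = tl[lo] := by
          simp [PySem.List.pyGet?_natCast, List.getElem?_eq_getElem hlo]
        simp only [goB, if_neg hle, hsub, hgetT]
        by_cases ht : tl[lo] > tt
        · have hls : lo < sl.length := hpre lo hlo (le_refl _) (by omega) ht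
          have hzlo : lo < (tl.zip sl).length := by simp [List.length_zip]; omega
          have hdrop : (tl.zip sl).drop lo = (tl.zip sl)[lo] :: (tl.zip sl).drop (lo + 1) :=
            List.drop_eq_getElem_cons hzlo
          have hz : (tl.zip sl)[lo] = (tl[lo], sl[lo]) := by
            simp [List.getElem_zip]
          have hgetS : (PySem.List.pyGet? sl (lo : Int)).getD 0 = sl[lo] := by
            simp [PySem.List.pyGet?_natCast, List.getElem?_eq_getElem hls]
          rw [if_pos ht, hdrop, hz, hgetS]
          simp [ht]
        · rw [if_neg ht]
          rcases hdk : (tl.zip sl).drop lo with _ | ⟨p, r⟩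
          · simp
          · have hp : p.1 = tl[lo] := by
              have hz : lo < (tl.zip sl).length := by
                by_contra hcon
                rw [List.drop_eq_nil_of_le (by omega)] at hdk
                exact List.cons_ne_nil _ _ hdk.symm
              have : (tl.zip sl)[lo] = p := by
                have := List.drop_eq_getElem_cons hz
                rw [hdk] at this
                exact (List.cons.injEq _ _ _ _ ▸ this).1.symm
              rw [← this, List.getElem_zip]
            simp [hp, ht]
      · have hmid : lo < (lo + hi) / 2 ∧ (lo + hi) / 2 < hi := by omega
        set mid := (lo + hi) / 2 with hmiddef
        have ihl := ih lo mid (by omega) (by omega)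
          (fun j hj h1 h2 hgt => hpre j hj h1 (by omega) hgt)
        have ihr := ih mid hi (by omega) hlen
          (fun j hj h1 h2 hgt => hpre j hj (by omega) h2 hgt)
        simp only [goB, if_neg hle, if_neg hone, ← hmiddef]
        rw [ihl, ihr]
        have hsplit : (((tl.zip sl).drop lo).take (hi - lo))
            = (((tl.zip sl).drop lo).take (mid - lo))
              ++ ((((tl.zip sl).drop lo).drop (mid - lo)).take (hi - mid)) := by
          rw [← List.take_add]
          congr 1
          omega
        have hdd : ((tl.zip sl).drop lo).drop (mid - lo) = (tl.zip sl).drop mid := by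
          rw [List.drop_drop]
          congr 1
          omega
        rw [hsplit, hdd, List.filter_append, List.map_append, List.map_append]

-- ===== VERDICT (by name: the statement is the Claim_ definition above) =====
theorem removeBeforeData_spec : Claim_equal_removeBeforeData := by
  intro tl sl tt _ hpre
  unfold Spec_removeBeforeData removeBeforeData removeBeforeData_alt
  have h : ∀ j, (h : j < tl.length) → tl[j] > tt → 0 + j < sl.length := by
    intro j hj hgt
    have := hpre j (List.mem_range.mpr hj) (by rwa [getElem!_pos tl j hj])
    omega
  rw [goA_eq sl tt tl 0 [] [] h]
  rw [goB_eq tl sl tt tl.length 0 tl.length (by omega) (le_refl _)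
      (fun j hj _ _ hgt => by simpa using h j hj hgt)]
  have htake : ((tl.zip sl).drop 0).take (tl.length - 0) = tl.zip sl := by
    simp [List.take_of_length_le, List.length_zip]
  rw [htake]
  simp
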